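-- pv_equiv track=rewrite | github.com/victorres11/football-data-adhoc | scripts/enhance_northwestern_analysis.py | group_play_selection
-- ===== SOURCE A (Python) =====
-- def group_play_selection(play_types):
--     """Group play types into logical categories"""
--     grouped = {
--         'Rush Offense': 0,
--         'Pass Offense': 0,
--         'Special Teams': 0,
--         'Other': 0
--     }
--
--     for play_type, count in play_types.items():
--         if play_type in ['Rush', 'Rushing Touchdown']:
--             grouped['Rush Offense'] += count
--         elif play_type in ['Pass Reception', 'Pass Incompletion', 'Passing Touchdown', 'Sack']:
--             grouped['Pass Offense'] += count
--         elif play_type in ['Kickoff', 'Punt', 'Field Goal Good']: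
--             grouped['Special Teams'] += count
--         else:
--             grouped['Other'] += count
--
--     return grouped
-- ===== SOURCE B (Python) =====
-- def group_play_selection(play_types):
--     """Group play types into logical categories"""
--     categories = [
--         ('Rush Offense', ('Rush', 'Rushing Touchdown')),
--         ('Pass Offense', ('Pass Reception', 'Pass Incompletion', 'Passing Touchdown', 'Sack')),
--         ('Special Teams', ('Kickoff', 'Punt', 'Field Goal Good')),
--     ]
--     grouped = {name: sum(c for p, c in play_types.items() if p in members)
--                for name, members in categories}
--     grouped['Other'] = sum(play_types.values()) - sum(grouped.values())
--     return grouped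
-- ===== Notes on version B (the rewrite author's own statement) =====
-- stated objective: alternative
-- what changed: B has no per-item dispatch at all: each category total is computed as an independent filtered sum over the data (staged passes via a dict comprehension), and 'Other' is derived arithmetically as the grand total minus the three category totals, instead of A's single pass with a four-way if/elif branch per item.
import Mathlib
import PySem

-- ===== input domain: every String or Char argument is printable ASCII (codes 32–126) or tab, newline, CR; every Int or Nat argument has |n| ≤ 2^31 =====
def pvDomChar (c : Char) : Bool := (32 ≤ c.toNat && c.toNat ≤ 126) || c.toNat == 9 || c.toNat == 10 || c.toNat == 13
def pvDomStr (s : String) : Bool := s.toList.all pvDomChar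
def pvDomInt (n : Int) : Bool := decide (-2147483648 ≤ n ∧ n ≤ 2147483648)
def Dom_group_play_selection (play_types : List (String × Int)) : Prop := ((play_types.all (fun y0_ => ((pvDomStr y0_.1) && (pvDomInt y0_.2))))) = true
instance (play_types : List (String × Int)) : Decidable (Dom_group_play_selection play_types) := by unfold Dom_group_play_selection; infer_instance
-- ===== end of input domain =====

-- B removes A's per-item four-way branch: each category total is an independent filtered
-- sum over the data, and 'Other' is derived as grand total minus the three category sums.

-- ===== PORT A =====
def group_play_selection (play_types : List (String × Int)) : List (String × Int) :=
  let grouped : PySem.Dict String Int :=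
    (((PySem.Dict.empty.insert "Rush Offense" 0).insert "Pass Offense" 0).insert
        "Special Teams" 0).insert "Other" 0
  let grouped := play_types.foldl (fun g p =>
    if p.1 = "Rush" ∨ p.1 = "Rushing Touchdown" then
      g.insert "Rush Offense" (g.getD "Rush Offense" 0 + p.2)
    else if p.1 = "Pass Reception" ∨ p.1 = "Pass Incompletion" ∨
            p.1 = "Passing Touchdown" ∨ p.1 = "Sack" then
      g.insert "Pass Offense" (g.getD "Pass Offense" 0 + p.2)
    else if p.1 = "Kickoff" ∨ p.1 = "Punt" ∨ p.1 = "Field Goal Good" then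
      g.insert "Special Teams" (g.getD "Special Teams" 0 + p.2)
    else
      g.insert "Other" (g.getD "Other" 0 + p.2)) grouped
  grouped.items

-- ===== PORT B =====
def group_play_selection_alt (play_types : List (String × Int)) : List (String × Int) :=
  let categories : List (String × List String) :=
    [("Rush Offense", ["Rush", "Rushing Touchdown"]),
     ("Pass Offense", ["Pass Reception", "Pass Incompletion", "Passing Touchdown", "Sack"]),
     ("Special Teams", ["Kickoff", "Punt", "Field Goal Good"])]
  let grouped : PySem.Dict String Int := PySem.Dict.ofList
    (categories.map (fun nm =>
      (nm.1, ((play_types.filter (fun p => nm.2.contains p.1)).map (fun p => p.2)).sum)))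
  let grouped := grouped.insert "Other"
      ((play_types.map (fun p => p.2)).sum - grouped.values.sum)
  grouped.items

-- ===== PRECONDITION & SPEC =====
def Spec_group_play_selection (play_types : List (String × Int)) (out : List (String × Int)) : Prop := out = group_play_selection_alt play_types
instance (play_types : List (String × Int)) (out : List (String × Int)) : Decidable (Spec_group_play_selection play_types out) := by unfold Spec_group_play_selection; infer_instance

-- ===== CLAIM (what is proved, stated in full; the proofs are below) =====
def Claim_equal_group_play_selection : Prop := ∀ (play_types : List (String × Int)), Dom_group_play_selection play_types → Spec_group_play_selection play_types (group_play_selection play_types)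

-- ===== LEMMAS AND PROOFS =====

-- category membership tests, as Booleans
def isRush (s : String) : Bool := s == "Rush" || s == "Rushing Touchdown"
def isPass (s : String) : Bool :=
  s == "Pass Reception" || s == "Pass Incompletion" || s == "Passing Touchdown" || s == "Sack"
def isSpec (s : String) : Bool := s == "Kickoff" || s == "Punt" || s == "Field Goal Good"

-- filtered sum of counts
def catSum (f : String → Bool) (l : List (String × Int)) : Int :=
  ((l.filter (fun p => f p.1)).map (fun p => p.2)).sum

theorem catSum_nil (f : String → Bool) : catSum f [] = 0 := rfl

theorem catSum_def (f : String → Bool) (l : List (String × Int)) :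
    ((l.filter (fun p => f p.1)).map (fun p => p.2)).sum = catSum f l := rfl

theorem catSum_cons (f : String → Bool) (p : String × Int) (t : List (String × Int)) :
    catSum f (p :: t) = (if f p.1 then p.2 else 0) + catSum f t := by
  by_cases h : f p.1 <;> simp [catSum, h]

-- A's loop, starting from the canonical four-key state, lands on the filtered sums.
theorem loopA (l : List (String × Int)) : ∀ (a b c d : Int),
    l.foldl (fun g p =>
      if p.1 = "Rush" ∨ p.1 = "Rushing Touchdown" then
        g.insert "Rush Offense" (g.getD "Rush Offense" 0 + p.2)
      else if p.1 = "Pass Reception" ∨ p.1 = "Pass Incompletion" ∨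
              p.1 = "Passing Touchdown" ∨ p.1 = "Sack" then
        g.insert "Pass Offense" (g.getD "Pass Offense" 0 + p.2)
      else if p.1 = "Kickoff" ∨ p.1 = "Punt" ∨ p.1 = "Field Goal Good" then
        g.insert "Special Teams" (g.getD "Special Teams" 0 + p.2)
      else
        g.insert "Other" (g.getD "Other" 0 + p.2))
      (PySem.Dict.mk [("Rush Offense", a), ("Pass Offense", b), ("Special Teams", c), ("Other", d)]) =
    PySem.Dict.mk [("Rush Offense", a + catSum isRush l), ("Pass Offense", b + catSum isPass l),
      ("Special Teams", c + catSum isSpec l),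
      ("Other", d + catSum (fun s => !(isRush s || isPass s || isSpec s)) l)] := by
  induction l with
  | nil => intro a b c d; simp [catSum_nil]
  | cons p t ih =>
    intro a b c d
    obtain ⟨s, n⟩ := p
    simp only [List.foldl_cons]
    by_cases h1 : s = "Rush" ∨ s = "Rushing Touchdown"
    · have hr : isRush s = true := by rcases h1 with h | h <;> simp [isRush, h]
      have hp : isPass s = false := by rcases h1 with h | h <;> simp [isPass, h]
      have hs : isSpec s = false := by rcases h1 with h | h <;> simp [isSpec, h]
      rw [show (if (s, n).1 = "Rush" ∨ (s, n).1 = "Rushing Touchdown" then _ else _) =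
        PySem.Dict.mk [("Rush Offense", a + n), ("Pass Offense", b), ("Special Teams", c), ("Other", d)] by
          simp [h1, PySem.Dict.getD, PySem.Dict.get?, PySem.Dict.insert]]
      rw [ih]
      simp [catSum_cons, hr, hp, hs]; ring
    · by_cases h2 : s = "Pass Reception" ∨ s = "Pass Incompletion" ∨ s = "Passing Touchdown" ∨ s = "Sack"
      · have hr : isRush s = false := by
          simp [isRush]; tauto
        have hp : isPass s = true := by rcases h2 with h | h | h | h <;> simp [isPass, h]
        have hs : isSpec s = false := by
          rcases h2 with h | h | h | h <;> simp [isSpec, h]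
        rw [show (if (s, n).1 = "Rush" ∨ (s, n).1 = "Rushing Touchdown" then _ else _) =
          PySem.Dict.mk [("Rush Offense", a), ("Pass Offense", b + n), ("Special Teams", c), ("Other", d)] by
            simp [h1, h2, PySem.Dict.getD, PySem.Dict.get?, PySem.Dict.insert]]
        rw [ih]
        simp [catSum_cons, hr, hp, hs]; ring
      · by_cases h3 : s = "Kickoff" ∨ s = "Punt" ∨ s = "Field Goal Good"
        · have hr : isRush s = false := by simp [isRush]; tauto
          have hp : isPass s = false := by
            simp [isPass]; tauto
          have hs : isSpec s = true := by rcases h3 with h | h | h <;> simp [isSpec, h]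
          rw [show (if (s, n).1 = "Rush" ∨ (s, n).1 = "Rushing Touchdown" then _ else _) =
            PySem.Dict.mk [("Rush Offense", a), ("Pass Offense", b), ("Special Teams", c + n), ("Other", d)] by
              simp [h1, h2, h3, PySem.Dict.getD, PySem.Dict.get?, PySem.Dict.insert]]
          rw [ih]
          simp [catSum_cons, hr, hp, hs]; ring
        · have hr : isRush s = false := by simp [isRush]; tauto
          have hp : isPass s = false := by
            simp [isPass]; tauto
          have hs : isSpec s = false := by
            simp [isSpec]; tauto
          rw [show (if (s, n).1 = "Rush" ∨ (s, n).1 = "Rushing Touchdown" then _ else _) =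
            PySem.Dict.mk [("Rush Offense", a), ("Pass Offense", b), ("Special Teams", c), ("Other", d + n)] by
              simp [h1, h2, h3, PySem.Dict.getD, PySem.Dict.get?, PySem.Dict.insert]]
          rw [ih]
          simp [catSum_cons, hr, hp, hs]; ring

-- the three explicit categories are pairwise disjoint
theorem rush_not_pass {s : String} (h : isRush s = true) : isPass s = false := by
  simp only [isRush, Bool.or_eq_true, beq_iff_eq] at h
  rcases h with h | h <;> simp [isPass, h]

theorem rush_not_spec {s : String} (h : isRush s = true) : isSpec s = false := by
  simp only [isRush, Bool.or_eq_true, beq_iff_eq] at h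
  rcases h with h | h <;> simp [isSpec, h]

theorem pass_not_spec {s : String} (h : isPass s = true) : isSpec s = false := by
  simp only [isPass, Bool.or_eq_true, beq_iff_eq] at h
  rcases h with ((h | h) | h) | h <;> simp [isSpec, h]

-- The grand total splits over the four disjoint categories.
theorem total_split (l : List (String × Int)) :
    (l.map (fun p => p.2)).sum =
      catSum isRush l + catSum isPass l + catSum isSpec l +
      catSum (fun s => !(isRush s || isPass s || isSpec s)) l := by
  induction l with
  | nil => simp [catSum_nil]
  | cons p t ih =>
    obtain ⟨s, n⟩ := p
    simp only [List.map_cons, List.sum_cons, catSum_cons, ih]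
    by_cases hr : isRush s
    · simp [hr, rush_not_pass hr, rush_not_spec hr]; ring
    · by_cases hp : isPass s
      · simp [hr, hp, pass_not_spec hp]; ring
      · by_cases hs : isSpec s <;> simp [hr, hp, hs] <;> ring

-- B's membership predicates, rewritten as the named category tests
theorem contains_rush :
    (fun p : String × Int => (["Rush", "Rushing Touchdown"] : List String).contains p.1) =
    (fun p : String × Int => isRush p.1) := by
  funext p; simp [isRush, beq_eq_decide]

theorem contains_pass :
    (fun p : String × Int =>
      (["Pass Reception", "Pass Incompletion", "Passing Touchdown", "Sack"] : List String).contains p.1) =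
    (fun p : String × Int => isPass p.1) := by
  funext p; simp [isPass, beq_eq_decide, Bool.or_assoc]

theorem contains_spec :
    (fun p : String × Int => (["Kickoff", "Punt", "Field Goal Good"] : List String).contains p.1) =
    (fun p : String × Int => isSpec p.1) := by
  funext p; simp [isSpec, beq_eq_decide, Bool.or_assoc]

-- ===== VERDICT (by name: the statement is the Claim_ definition above) =====
theorem group_play_selection_spec : Claim_equal_group_play_selection := by
  intro l _
  unfold Spec_group_play_selection group_play_selection group_play_selection_alt
  simp only []
  rw [show (((PySem.Dict.empty.insert "Rush Offense" (0:Int)).insert "Pass Offense" 0).insert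
        "Special Teams" 0).insert "Other" 0 =
      PySem.Dict.mk [("Rush Offense", 0), ("Pass Offense", 0), ("Special Teams", 0), ("Other", 0)] from rfl]
  rw [loopA l 0 0 0 0]
  simp only [zero_add, List.map_cons, List.map_nil, contains_rush, contains_pass, contains_spec]
  simp only [PySem.Dict.ofList, PySem.Dict.update, PySem.Dict.insert, PySem.Dict.empty,
    PySem.Dict.contains, PySem.Dict.values]
  simp only [List.foldl_cons, List.foldl_nil]
  simp only [catSum_def]
  simp
  have := total_split l
  simp only [Bool.not_or] at this
  omega
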